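-- pv_equiv track=rewrite | github.com/Alfred1109/xuanxuestructural | fix_tables.py | fix_markdown_tables
-- ===== SOURCE A (Python) =====
-- def fix_markdown_tables(content):
--     """在Markdown表格前添加空行，但保持表格行连续"""
--     lines = content.split('\n')
--     fixed_lines = []
--     in_table = False
--
--     for i, line in enumerate(lines):
--         # 检查当前行是否是表格行
--         is_table_line = line.strip().startswith('|') and '|' in line
--
--         if is_table_line:
--             if not in_table:
--                 # 表格开始：检查上一行是否为空
--                 if fixed_lines and fixed_lines[-1].strip() != '':
--                     fixed_lines.append('')  # 在表格前添加空行
--                 in_table = True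
--             # 表格行直接添加，不加额外空行
--             fixed_lines.append(line)
--         else:
--             if in_table:
--                 # 表格结束：在表格后添加空行（如果下一行不是空行）
--                 if line.strip() != '':
--                     fixed_lines.append('')
--                 in_table = False
--             fixed_lines.append(line)
--
--     return '\n'.join(fixed_lines)
-- ===== SOURCE B (Python) =====
-- def _is_table(line):
--     return line.strip().startswith('|') and '|' in line
--
--
-- def _runs(lines):
--     """Split lines into maximal runs of equal table-ness: [(is_table, [lines])]."""
--     runs = []
--     i = 0
--     n = len(lines)
--     while i < n:
--         k = _is_table(lines[i])
--         j = i + 1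
--         while j < n and _is_table(lines[j]) == k:
--             j += 1
--         runs.append((k, lines[i:j]))
--         i = j
--     return runs
--
--
-- def fix_markdown_tables(content):
--     out = []
--     prev_k = None
--     for k, run in _runs(content.split('\n')):
--         if prev_k is not None:
--             if k:
--                 if out[-1].strip() != '':
--                     out.append('')
--             elif prev_k and run[0].strip() != '':
--                 out.append('')
--         out.extend(run)
--         prev_k = k
--     return '\n'.join(out)
-- ===== Notes on version B (the rewrite author's own statement) =====
-- stated objective: alternative
-- what changed: B first splits the lines into maximal runs of equal table-ness (a span-based grouping pre-pass) and then emits the runs, inserting a blank line at run boundaries, instead of A's single stateful pass with an in_table flag and per-line branching.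
import Mathlib
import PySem

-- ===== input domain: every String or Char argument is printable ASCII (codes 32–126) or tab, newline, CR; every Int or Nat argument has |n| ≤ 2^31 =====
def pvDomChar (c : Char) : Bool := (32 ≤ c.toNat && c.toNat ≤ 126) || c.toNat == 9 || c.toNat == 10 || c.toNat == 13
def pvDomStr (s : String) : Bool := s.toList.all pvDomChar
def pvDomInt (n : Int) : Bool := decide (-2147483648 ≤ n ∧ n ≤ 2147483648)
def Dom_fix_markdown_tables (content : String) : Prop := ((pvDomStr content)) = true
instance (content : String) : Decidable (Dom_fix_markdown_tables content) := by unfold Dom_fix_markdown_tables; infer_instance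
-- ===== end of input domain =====

-- B groups the lines into maximal runs of equal table-ness and emits the runs with blank
-- lines at run boundaries, instead of A's single stateful pass with an in_table flag.


-- ===== PORT A =====
-- lines are List Char (PySem.Chars is exact on the ASCII domain); one iteration of A's
-- for-loop, state = (fixed_lines, in_table)
def fixAStep (st : List (List Char) × Bool) (line : List Char) : List (List Char) × Bool :=
  let is_table_line := PySem.Chars.startswith (PySem.Chars.strip line) ['|'] && PySem.Chars.isIn ['|'] line
  if is_table_line then
    let fixed :=
      if !st.2 then
        -- `if fixed_lines and fixed_lines[-1].strip() != '':`
        match st.1.getLast? with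
        | some last => if PySem.Chars.strip last ≠ [] then st.1 ++ [[]] else st.1
        | none => st.1
      else st.1
    (fixed ++ [line], true)
  else
    let fixed := if st.2 && PySem.Chars.strip line ≠ [] then st.1 ++ [[]] else st.1
    (fixed ++ [line], false)

def fix_markdown_tables (content : String) : String :=
  String.mk (PySem.Chars.join ['\n']
    ((PySem.Chars.splitOn content.toList ['\n']).foldl fixAStep ([], false)).1)

-- ===== PORT B =====
def isTabLine (line : List Char) : Bool :=
  PySem.Chars.startswith (PySem.Chars.strip line) ['|'] && PySem.Chars.isIn ['|'] line

-- `_runs`: each step of the outer while loop takes the maximal span (takeWhile/dropWhile)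
-- with the key of the current first line
def groupRuns : List (List Char) → List (Bool × List (List Char))
  | [] => []
  | l :: ls =>
    let k := isTabLine l
    (k, l :: ls.takeWhile (fun x => isTabLine x == k)) ::
      groupRuns (ls.dropWhile (fun x => isTabLine x == k))
termination_by ls => ls.length
decreasing_by
  simpa using Nat.lt_succ_of_le (List.length_dropWhile_le _ _)

-- the emission loop over the runs; `out[-1]` / `run[0]` are total in the Python (out is
-- nonempty whenever prev_k is not None, runs are nonempty), ported via getLastD/headD
def emitRuns : List (Bool × List (List Char)) → List (List Char) → Option Bool → List (List Char)
  | [], out, _ => out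
  | (k, g) :: rs, out, prevk =>
    let out :=
      match prevk with
      | none => out
      | some pk =>
        if k then
          if PySem.Chars.strip (out.getLastD []) ≠ [] then out ++ [[]] else out
        else if pk then
          if PySem.Chars.strip (g.headD []) ≠ [] then out ++ [[]] else out
        else out
    emitRuns rs (out ++ g) (some k)

def fix_markdown_tables_alt (content : String) : String :=
  String.mk (PySem.Chars.join ['\n']
    (emitRuns (groupRuns (PySem.Chars.splitOn content.toList ['\n'])) [] none))

-- ===== PRECONDITION & SPEC =====
def Spec_fix_markdown_tables (content : String) (out : String) : Prop := out = fix_markdown_tables_alt content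
instance (content : String) (out : String) : Decidable (Spec_fix_markdown_tables content out) := by unfold Spec_fix_markdown_tables; infer_instance

-- ===== CLAIM (what is proved, stated in full; the proofs are below) =====
def Claim_equal_fix_markdown_tables : Prop := ∀ (content : String), Dom_fix_markdown_tables content → Spec_fix_markdown_tables content (fix_markdown_tables content)

-- ===== LEMMAS AND PROOFS =====

theorem fixAStep_of_true {line : List Char} (h : isTabLine line = true)
    (st : List (List Char) × Bool) :
    fixAStep st line =
      ((if !st.2 then
          match st.1.getLast? with
          | some last => if PySem.Chars.strip last ≠ [] then st.1 ++ [[]] else st.1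
          | none => st.1
        else st.1) ++ [line], true) := by
  unfold fixAStep
  rw [show (PySem.Chars.startswith (PySem.Chars.strip line) ['|'] && PySem.Chars.isIn ['|'] line)
        = isTabLine line from rfl, h]
  simp

theorem fixAStep_of_false {line : List Char} (h : isTabLine line = false)
    (st : List (List Char) × Bool) :
    fixAStep st line =
      ((if st.2 && PySem.Chars.strip line ≠ [] then st.1 ++ [[]] else st.1) ++ [line], false) := by
  unfold fixAStep
  rw [show (PySem.Chars.startswith (PySem.Chars.strip line) ['|'] && PySem.Chars.isIn ['|'] line)
        = isTabLine line from rfl, h]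
  simp

-- A's loop over the tail of a run of table lines while already in a table: just appends
theorem foldA_run_true (run : List (List Char)) (acc : List (List Char))
    (h : ∀ x ∈ run, isTabLine x = true) :
    run.foldl fixAStep (acc, true) = (acc ++ run, true) := by
  induction run generalizing acc with
  | nil => simp
  | cons l ls ih =>
    simp only [List.foldl_cons, fixAStep_of_true (h l (by simp))]
    rw [ih _ (fun x hx => h x (by simp [hx]))]
    simp

-- A's loop over the tail of a run of non-table lines while not in a table: just appends
theorem foldA_run_false (run : List (List Char)) (acc : List (List Char))
    (h : ∀ x ∈ run, isTabLine x = false) :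
    run.foldl fixAStep (acc, false) = (acc ++ run, false) := by
  induction run generalizing acc with
  | nil => simp
  | cons l ls ih =>
    simp only [List.foldl_cons, fixAStep_of_false (h l (by simp))]
    rw [ih _ (fun x hx => h x (by simp [hx]))]
    simp

theorem head_dropWhile_false {α : Type} (p : α → Bool) (l : List α) {h : α}
    (hh : (l.dropWhile p).head? = some h) : p h = false := by
  induction l with
  | nil => simp at hh
  | cons a as ih =>
    by_cases ha : p a
    · rw [List.dropWhile_cons_of_pos ha] at hh; exact ih hh
    · rw [List.dropWhile_cons_of_neg ha] at hh
      simp only [List.head?_cons, Option.some.injEq] at hh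
      rw [← hh]; simpa using ha
-- the inductive correspondence: A's state (acc, in_table) against B's (out, prev_k).
-- prev_k = none ↔ nothing emitted yet; prev_k = some pk ↔ acc nonempty, in_table = pk,
-- and the next line (if any) opens a run of the other kind.
theorem main_corr : ∀ (n : ℕ) (ls acc : List (List Char)) (pk : Option Bool),
    ls.length ≤ n →
    (match pk with
     | none => acc = []
     | some b => acc ≠ [] ∧ ∀ h, ls.head? = some h → isTabLine h ≠ b) →
    emitRuns (groupRuns ls) acc pk = (ls.foldl fixAStep (acc, pk.getD false)).1 := by
  intro n
  induction n with
  | zero =>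
    intro ls acc pk hlen hst
    have : ls = [] := List.eq_nil_of_length_eq_zero (Nat.le_zero.mp hlen)
    subst this
    cases pk <;> simp [groupRuns, emitRuns]
  | succ n ih =>
    intro ls acc pk hlen hst
    cases ls with
    | nil => cases pk <;> simp [groupRuns, emitRuns]
    | cons l ls =>
      set k := isTabLine l with hk
      set run := ls.takeWhile (fun x => isTabLine x == k) with hrun
      set rest := ls.dropWhile (fun x => isTabLine x == k) with hrest
      have hsplit : ls = run ++ rest := (List.takeWhile_append_dropWhile).symm
      have hrunall : ∀ x ∈ run, isTabLine x = k := by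
        intro x hx
        have := List.mem_takeWhile_imp (hrun ▸ hx)
        simpa using this
      have hrestlen : rest.length ≤ n := by
        have h1 : rest.length ≤ ls.length := by
          rw [hrest]; exact List.length_dropWhile_le _ _
        have h2 : ls.length + 1 ≤ n + 1 := by simpa using hlen
        omega
      have hgroup : groupRuns (l :: ls) = (k, l :: run) :: groupRuns rest := by
        rw [groupRuns]
      -- the blank-line decision: A's on the first line of the run agrees with B's on the run
      have key : ∃ acc' : List (List Char),
          (fixAStep (acc, pk.getD false) l = (acc' ++ [l], k)) ∧
          (emitRuns (groupRuns (l :: ls)) acc pk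
            = emitRuns (groupRuns rest) (acc' ++ (l :: run)) (some k)) := by
        rw [hgroup]
        cases pk with
        | none =>
          have hacc : acc = [] := hst
          subst hacc
          refine ⟨[], ?_, ?_⟩
          · cases hkv : k
            · rw [fixAStep_of_false (hk ▸ hkv)]; simp
            · rw [fixAStep_of_true (hk ▸ hkv)]; simp
          · simp [emitRuns]
        | some pkv =>
          obtain ⟨hne, hhead⟩ := hst
          have hkpk : k ≠ pkv := by
            have := hhead l (by simp)
            simpa [← hk] using this
          cases pkv with
          | false =>
            have hkt : k = true := by
              cases hkv : k
              · exact absurd hkv hkpk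
              · rfl
            obtain ⟨last, hlast⟩ := Option.ne_none_iff_exists'.mp
              (mt List.getLast?_eq_none_iff.mp hne)
            refine ⟨if PySem.Chars.strip last ≠ [] then acc ++ [[]] else acc, ?_, ?_⟩
            · rw [fixAStep_of_true (hk ▸ hkt)]
              simp [hlast, hkt]
            · simp [emitRuns, hkt, List.getLastD_eq_getLast?, hlast]
          | true =>
            have hkf : k = false := by
              cases hkv : k
              · rfl
              · exact absurd hkv hkpk
            refine ⟨if PySem.Chars.strip l ≠ [] then acc ++ [[]] else acc, ?_, ?_⟩
            · rw [fixAStep_of_false (hk ▸ hkf)]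
              simp [hkf]
            · simp [emitRuns, hkf]
      obtain ⟨acc', hA, hB⟩ := key
      rw [hB]
      have hnext : ∀ h, rest.head? = some h → isTabLine h ≠ k := by
        intro h hh hcontra
        have := head_dropWhile_false (fun x => isTabLine x == k) ls (hrest ▸ hh)
        simp [hcontra] at this
      rw [ih rest (acc' ++ (l :: run)) (some k) hrestlen ⟨by simp, hnext⟩]
      have hfoldrun : run.foldl fixAStep (acc' ++ [l], k) = (acc' ++ [l] ++ run, k) := by
        cases hkv : k
        · exact foldA_run_false run _ (fun x hx => hkv ▸ hrunall x hx)
        · exact foldA_run_true run _ (fun x hx => hkv ▸ hrunall x hx)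
      conv_rhs => rw [hsplit]
      simp only [List.foldl_cons, hA, List.foldl_append]
      rw [hfoldrun]
      simp

-- ===== VERDICT (by name: the statement is the Claim_ definition above) =====
theorem fix_markdown_tables_spec : Claim_equal_fix_markdown_tables := by
  intro content _
  unfold Spec_fix_markdown_tables fix_markdown_tables fix_markdown_tables_alt
  congr 2
  exact (main_corr (PySem.Chars.splitOn content.toList ['\n']).length _ [] none le_rfl rfl).symm
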